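-- pv_equiv track=rewrite | github.com/Ayush-Malik/PracAlgos | minimum_number_of_steps_to_reach_end_of_an_arr.py | find_max_val_index_in
-- ===== SOURCE A (Python) =====
-- def find_max_val_index_in(arr):
--     max_val = arr[0]
--     max_ind = 0
--
--     for i in range(1 , len(arr)):
--         if arr[i] > max_val:
--             max_val = arr[i]
--             max_ind = i
--
--     return max_ind
-- ===== SOURCE B (Python) =====
-- def find_max_val_index_in(arr):
--     return arr.index(max(arr))
-- ===== Notes on version B (the rewrite author's own statement) =====
-- stated objective: idiomatic
-- what changed: Replaced the fused running-max/index loop by a compute-then-search decomposition: max(arr) in one pass, then arr.index of that value in a second pass (both prefer the earliest element, matching A's strict > tie-breaking).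
import Mathlib
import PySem

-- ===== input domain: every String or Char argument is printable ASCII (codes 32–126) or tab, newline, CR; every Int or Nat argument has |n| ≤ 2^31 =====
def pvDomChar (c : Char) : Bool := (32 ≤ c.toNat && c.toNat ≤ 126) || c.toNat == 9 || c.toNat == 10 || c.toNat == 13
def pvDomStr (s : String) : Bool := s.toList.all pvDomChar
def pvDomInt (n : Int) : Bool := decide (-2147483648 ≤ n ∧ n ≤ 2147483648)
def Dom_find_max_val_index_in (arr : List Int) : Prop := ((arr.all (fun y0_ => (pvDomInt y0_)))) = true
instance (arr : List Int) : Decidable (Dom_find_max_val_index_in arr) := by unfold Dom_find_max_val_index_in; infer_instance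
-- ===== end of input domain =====

-- B replaces A's fused running-max/index loop by max(arr) then arr.index(...): two idiomatic passes, same value.


-- ===== PORT A =====
-- literal port of A: start from arr[0]/index 0, scan range(1, len(arr)) updating on strict >
def find_max_val_index_in (arr : List Int) : Int :=
  ((PySem.List.pyRange 1 arr.length 1).foldl
    (fun (st : Int × Int) i =>
      if PySem.List.pyGetD arr i 0 > st.1 then (PySem.List.pyGetD arr i 0, i) else st)
    (PySem.List.pyGetD arr 0 0, 0)).2

-- ===== PORT B =====
-- port of Source B: max(arr), then arr.index of it (the 0 defaults are unreachable under Pre_)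
def find_max_val_index_in_alt (arr : List Int) : Int :=
  match PySem.List.max? arr (fun x => x) with
  | none => 0
  | some m => ((PySem.List.index? arr m).getD 0 : Nat)

-- ===== PRECONDITION & SPEC =====
-- Pre_ excludes only the empty list, on which A raises IndexError (arr[0]).
def Pre_find_max_val_index_in (arr : List Int) : Prop := arr ≠ []
instance (arr : List Int) : Decidable (Pre_find_max_val_index_in arr) := by unfold Pre_find_max_val_index_in; infer_instance
def pvWitness_find_max_val_index_in : List Int := [3, 1, 3]

def Spec_find_max_val_index_in (arr : List Int) (out : Int) : Prop := out = find_max_val_index_in_alt arr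
instance (arr : List Int) (out : Int) : Decidable (Spec_find_max_val_index_in arr out) := by unfold Spec_find_max_val_index_in; infer_instance

-- ===== CLAIM (what is proved, stated in full; the proofs are below) =====
def Claim_equal_find_max_val_index_in : Prop := ∀ (arr : List Int), Dom_find_max_val_index_in arr → Pre_find_max_val_index_in arr → Spec_find_max_val_index_in arr (find_max_val_index_in arr)

-- ===== LEMMAS AND PROOFS =====

-- A's loop, rewritten as structural recursion over the suffix of arr, carrying the running index.
def goA (l : List Int) (i : Int) (st : Int × Int) : Int × Int :=
  match l with
  | [] => st
  | x :: t => goA t (i + 1) (if x > st.1 then (x, i) else st)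

-- A's pyRange fold equals goA on the corresponding suffix.
lemma fold_eq_goA (arr : List Int) :
    ∀ (l : List Int) (a : Int) (st : Int × Int), 0 ≤ a → arr.drop a.toNat = l →
    (PySem.List.pyRange a arr.length 1).foldl
      (fun (st : Int × Int) i =>
        if PySem.List.pyGetD arr i 0 > st.1 then (PySem.List.pyGetD arr i 0, i) else st) st
    = goA l a st := by
  intro l
  induction l with
  | nil =>
    intro a st ha hd
    have : (arr.length : Int) ≤ a := by
      have := congrArg List.length hd
      simp [List.length_drop] at this
      omega
    rw [PySem.List.pyRange_one_eq_nil this]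
    simp [goA]
  | cons x t ih =>
    intro a st ha hd
    have hlt : a < (arr.length : Int) := by
      have := congrArg List.length hd
      simp [List.length_drop] at this
      omega
    have hget : PySem.List.pyGetD arr a 0 = x := by
      have h1 : arr[a.toNat]? = some x := by
        rw [← List.head?_drop, hd]; rfl
      rw [PySem.List.pyGetD_of_nonneg _ _ ha]
      simp [List.getD_eq_getElem?_getD, h1]
    have hd' : arr.drop (a + 1).toNat = t := by
      have : (a + 1).toNat = a.toNat + 1 := by omega
      rw [this]
      have := congrArg (List.drop 1) hd
      simpa [List.drop_drop, Nat.add_comm] using this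
    rw [PySem.List.pyRange_one_cons hlt]
    simp only [List.foldl_cons, hget]
    rw [ih (a + 1) _ (by omega) hd']
    simp [goA]

-- the value component of goA is the running max
lemma goA_spec (t : List Int) :
    ∀ (i mv : Int) (mi : Int),
    goA t i (mv, mi) =
      if t.foldl max mv = mv then (mv, mi)
      else (t.foldl max mv, i + ((PySem.List.index? t (t.foldl max mv)).getD 0 : Nat)) := by
  induction t with
  | nil => intro i mv mi; simp [goA]
  | cons y t ih =>
    intro i mv mi
    have hle : ∀ (a : Int), a ≤ t.foldl max a := fun a => (PySem.List.le_foldl_max t a).1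
    by_cases hy : y > mv
    · have hmax : max mv y = y := by omega
      simp only [goA, if_pos hy, ih, List.foldl_cons, hmax]
      by_cases h1 : t.foldl max y = y
      · rw [if_pos h1]
        have hne : ¬ t.foldl max y = mv := by rw [h1]; omega
        rw [if_neg hne, h1]
        rw [show PySem.List.index? (y :: t) y = some 0 from PySem.List.index?_cons_self y t]
        simp
      · rw [if_neg h1]
        have hMy : y < t.foldl max y := lt_of_le_of_ne (hle y) (fun h => h1 h.symm)
        have hne : ¬ t.foldl max y = mv := by omega
        rw [if_neg hne]
        have hney : y ≠ t.foldl max y := by omega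
        rw [PySem.List.index?_cons_of_ne t hney]
        have hmem : t.foldl max y ∈ t := by
          rcases PySem.List.foldl_max_mem t y with h | h
          · exact absurd h h1
          · exact h
        obtain ⟨k, hk⟩ := Option.isSome_iff_exists.mp ((PySem.List.index?_isSome_iff t (t.foldl max y)).2 hmem)
        rw [hk]
        simp
        omega
    · have hmax : max mv y = mv := by omega
      simp only [goA, if_neg hy, ih, List.foldl_cons, hmax]
      by_cases h1 : t.foldl max mv = mv
      · simp [h1]
      · rw [if_neg h1, if_neg h1]
        have hM : mv < t.foldl max mv := lt_of_le_of_ne (hle mv) (fun h => h1 h.symm)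
        have hney : y ≠ t.foldl max mv := by omega
        rw [PySem.List.index?_cons_of_ne t hney]
        have hmem : t.foldl max mv ∈ t := by
          rcases PySem.List.foldl_max_mem t mv with h | h
          · exact absurd h h1
          · exact h
        obtain ⟨k, hk⟩ := Option.isSome_iff_exists.mp ((PySem.List.index?_isSome_iff t (t.foldl max mv)).2 hmem)
        rw [hk]
        simp
        omega

-- ===== VERDICT (by name: the statement is the Claim_ definition above) =====
theorem find_max_val_index_in_spec : Claim_equal_find_max_val_index_in := by
  intro arr _ hpre
  obtain ⟨x, t, rfl⟩ := List.exists_cons_of_ne_nil hpre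
  unfold Spec_find_max_val_index_in find_max_val_index_in find_max_val_index_in_alt
  have hget0 : PySem.List.pyGetD (x :: t) 0 0 = x := by
    simp [PySem.List.pyGetD]
  rw [fold_eq_goA (x :: t) t 1 _ (by norm_num) (by simp), hget0, goA_spec]
  rw [show PySem.List.max? (x :: t) (fun y => y) = some (t.foldl max x) from PySem.List.max?_id_cons x t]
  by_cases h1 : t.foldl max x = x
  · rw [if_pos h1, h1]
    show (0 : Int) = (((PySem.List.index? (x :: t) x).getD 0 : Nat) : Int)
    rw [PySem.List.index?_cons_self x t]
    rfl
  · rw [if_neg h1]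
    have hney : x ≠ t.foldl max x := fun h => h1 h.symm
    have hmem : t.foldl max x ∈ t := by
      rcases PySem.List.foldl_max_mem t x with h | h
      · exact absurd h h1
      · exact h
    obtain ⟨k, hk⟩ := Option.isSome_iff_exists.mp ((PySem.List.index?_isSome_iff t (t.foldl max x)).2 hmem)
    show (1 + (((PySem.List.index? t (t.foldl max x)).getD 0 : Nat) : Int) : Int)
        = (((PySem.List.index? (x :: t) (t.foldl max x)).getD 0 : Nat) : Int)
    rw [PySem.List.index?_cons_of_ne t hney, hk]
    simp
    omega
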